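-- pv_equiv track=rewrite | github.com/matwerner/fgv-introcomp | python/aula17/gabarito/resposta_ex19.py | expand_number
-- ===== SOURCE A (Python) =====
-- def expand_number(num):
--     # Verifica se o número é positivo
--     if num <= 0:
--         return "O número deve ser um inteiro positivo."
--
--     # Convertendo o número para string para facilitar a manipulação
--     num_str = str(num)
--     length = len(num_str)
--
--     # Lista para armazenar os componentes da expansão
--     expanded_parts = []
--
--     # Percorre cada dígito
--     for i in range(length):
--         # Pega o valor do dígito atual
--         digit = int(num_str[i])
--
--         # Calcula o valor posicional (unidade, dezena, centena, etc.)
--         positional_value = digit * (10 ** (length - i - 1))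
--
--         # Adiciona na lista se o valor posicional for diferente de zero
--         if positional_value != 0:
--             expanded_parts.append(str(positional_value))
--
--     # Junta todos os componentes com ' + '
--     expanded_form = " + ".join(expanded_parts)
--
--     return expanded_form
-- ===== SOURCE B (Python) =====
-- def expand_number(num):
--     if num <= 0:
--         return "O número deve ser um inteiro positivo."
--     parts = []
--     n = num
--     place = 1
--     while n > 0:
--         value = (n % 10) * place
--         if value != 0:
--             parts.insert(0, str(value))
--         n //= 10
--         place *= 10
--     return " + ".join(parts)
-- ===== Notes on version B (the rewrite author's own statement) =====
-- stated objective: alternative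
-- what changed: Replaces string conversion plus per-digit indexing and 10** exponentiation with an arithmetic loop that extracts digits least-significant-first via % and //, maintaining an incremental place value and prepending nonzero terms.
import Mathlib
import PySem

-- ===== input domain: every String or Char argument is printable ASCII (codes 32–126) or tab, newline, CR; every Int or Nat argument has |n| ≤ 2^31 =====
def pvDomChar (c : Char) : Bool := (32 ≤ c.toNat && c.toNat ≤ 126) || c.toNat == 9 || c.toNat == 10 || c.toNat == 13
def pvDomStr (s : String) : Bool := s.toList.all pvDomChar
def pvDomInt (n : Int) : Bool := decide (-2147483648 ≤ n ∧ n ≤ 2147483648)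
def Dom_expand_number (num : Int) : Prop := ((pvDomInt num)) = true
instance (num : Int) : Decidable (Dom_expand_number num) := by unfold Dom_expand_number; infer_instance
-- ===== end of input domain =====

-- B replaces string conversion + per-digit indexing and 10** exponentiation by an arithmetic
-- least-significant-first digit loop (% and //) with an incremental place value; same results.


-- ===== PORT A =====
def expand_number (num : Int) : String :=
  if num ≤ 0 then "O número deve ser um inteiro positivo."
  else
    let numStr := PySem.Int.toChars num
    let length := PySem.List.len numStr
    let parts : List String :=
      (PySem.List.pyRange 0 length 1).foldl (fun acc i =>
        -- int(num_str[i]); for num > 0 every character is a digit, so int() never raises (the getD 0 default is unreachable)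
        let digit := (PySem.Int.ofChars? [PySem.List.pyGetD numStr i ' ']).getD 0
        -- 10 ** (length - i - 1): the exponent is ≥ 0 for every i in the range, so `.toNat` is exact
        let positionalValue := digit * 10 ^ (length - i - 1).toNat
        if positionalValue ≠ 0 then acc ++ [PySem.Int.toStr positionalValue] else acc) []
    PySem.Str.join " + " parts

-- ===== PORT B =====
-- termination measure of Source B's `while n > 0` loop (cited by `decreasing_by` below)
lemma floordiv_ten_toNat_lt (n : Int) (h : 0 < n) : (PySem.Int.floordiv n 10).toNat < n.toNat := by
  have hm : n = ((n.toNat : Nat) : Int) := by omega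
  rw [hm, show ((10:Int)) = ((10:Nat):Int) by norm_num, PySem.Int.floordiv_natCast]
  simp only [Int.toNat_natCast]
  exact Nat.div_lt_self (by omega) (by norm_num)

-- the `while n > 0` loop of Source B: parts.insert(0, str(value)) is the cons onto parts
def expandLoop (n place : Int) (parts : List String) : List String :=
  if h : 0 < n then
    let value := PySem.Int.mod n 10 * place
    expandLoop (PySem.Int.floordiv n 10) (place * 10)
      (if value ≠ 0 then PySem.Int.toStr value :: parts else parts)
  else parts
termination_by n.toNat
decreasing_by exact floordiv_ten_toNat_lt n h

def expand_number_alt (num : Int) : String :=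
  if num ≤ 0 then "O número deve ser um inteiro positivo."
  else PySem.Str.join " + " (expandLoop num 1 [])

-- ===== PRECONDITION & SPEC =====
def Spec_expand_number (num : Int) (out : String) : Prop := out = expand_number_alt num
instance (num : Int) (out : String) : Decidable (Spec_expand_number num out) := by unfold Spec_expand_number; infer_instance

-- ===== CLAIM (what is proved, stated in full; the proofs are below) =====
def Claim_equal_expand_number : Prop := ∀ (num : Int), Dom_expand_number num → Spec_expand_number num (expand_number num)

-- ===== LEMMAS AND PROOFS =====

-- common normal form of the parts list: the positional terms of m, places scaled by `place`
def pvG (m : Nat) (place : Int) : List String :=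
  if m < 10 then
    (if (m : Int) * place = 0 then [] else [PySem.Int.toStr ((m : Int) * place)])
  else
    pvG (m / 10) (place * 10) ++
      (if ((m % 10 : Nat) : Int) * place = 0 then [] else [PySem.Int.toStr (((m % 10 : Nat) : Int) * place)])
decreasing_by exact Nat.div_lt_self (by omega) (by norm_num)

-- ---- B side: expandLoop computes pvG ----
lemma expandLoop_pos (n place : Int) (parts : List String) (h : 0 < n) :
    expandLoop n place parts =
      expandLoop (PySem.Int.floordiv n 10) (place * 10)
        (if PySem.Int.mod n 10 * place ≠ 0 then PySem.Int.toStr (PySem.Int.mod n 10 * place) :: parts else parts) := by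
  conv_lhs => rw [expandLoop]
  rw [dif_pos h]

lemma expandLoop_nonpos (n place : Int) (parts : List String) (h : ¬ 0 < n) :
    expandLoop n place parts = parts := by
  rw [expandLoop, dif_neg h]

lemma expandLoop_acc (k : Nat) : ∀ (n place : Int), n.toNat = k → ∀ parts,
    expandLoop n place parts = expandLoop n place [] ++ parts := by
  induction k using Nat.strong_induction_on with
  | _ k ih =>
    intro n place hk parts
    by_cases h : 0 < n
    · have hlt : (PySem.Int.floordiv n 10).toNat < k := hk ▸ floordiv_ten_toNat_lt n h
      rw [expandLoop_pos n place parts h, expandLoop_pos n place [] h]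
      split_ifs with hc
      · rw [ih _ hlt _ _ rfl (PySem.Int.toStr (PySem.Int.mod n 10 * place) :: parts),
            ih _ hlt _ _ rfl [PySem.Int.toStr (PySem.Int.mod n 10 * place)]]
        simp
      · exact ih _ hlt _ _ rfl parts
    · rw [expandLoop_nonpos n place parts h, expandLoop_nonpos n place [] h]
      simp

lemma expandLoop_eq_pvG (k : Nat) : ∀ (m : Nat), m = k → 0 < m → ∀ (place : Int),
    expandLoop (m : Int) place [] = pvG m place := by
  induction k using Nat.strong_induction_on with
  | _ k ih =>
    intro m hk hm place
    have hpos : (0:Int) < (m:Int) := by exact_mod_cast hm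
    have hmod : PySem.Int.mod (m : Int) 10 = ((m % 10 : Nat) : Int) := by
      exact_mod_cast PySem.Int.mod_natCast m 10
    have hfdiv : PySem.Int.floordiv (m : Int) 10 = ((m / 10 : Nat) : Int) := by
      exact_mod_cast PySem.Int.floordiv_natCast m 10
    rw [pvG, expandLoop_pos _ _ _ hpos, hmod, hfdiv]
    by_cases h10 : m < 10
    · have h0 : m / 10 = 0 := Nat.div_eq_of_lt h10
      have hmodm : m % 10 = m := Nat.mod_eq_of_lt h10
      rw [if_pos h10, h0, hmodm, expandLoop_nonpos _ _ _ (by simp)]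
      simp only [ne_eq, ite_not]
    · have hdiv : 0 < m / 10 := Nat.div_pos (by omega) (by norm_num)
      rw [if_neg h10]
      rw [expandLoop_acc (((m / 10 : Nat) : Int)).toNat _ _ rfl _]
      have hih := ih (m/10) (by omega) (m/10) rfl hdiv (place * 10)
      rw [hih]
      simp only [ne_eq, ite_not]

-- ---- A side: Nat.toDigits recursion ----
lemma tdc_fuel (f : Nat) : ∀ (f' n : Nat) (l : List Char), n < f → n < f' →
    Nat.toDigitsCore 10 f n l = Nat.toDigitsCore 10 f' n l := by
  induction f with
  | zero => intro f' n l h; omega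
  | succ f ih =>
    intro f' n l h h'
    cases f' with
    | zero => omega
    | succ f'' =>
      simp only [Nat.toDigitsCore]
      by_cases h0 : n / 10 = 0
      · simp [h0]
      · simp only [h0, if_false]
        have hlt : n / 10 < n := Nat.div_lt_self (by omega) (by norm_num)
        exact ih f'' (n/10) _ (by omega) (by omega)

lemma tdc_acc (f : Nat) : ∀ (n : Nat) (l : List Char),
    Nat.toDigitsCore 10 f n l = Nat.toDigitsCore 10 f n [] ++ l := by
  induction f with
  | zero => intro n l; simp [Nat.toDigitsCore]
  | succ f ih =>
    intro n l
    simp only [Nat.toDigitsCore]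
    by_cases h0 : n / 10 = 0
    · simp [h0]
    · simp only [h0, if_false]
      rw [ih (n/10) [Nat.digitChar (n % 10)], ih (n/10) (Nat.digitChar (n % 10) :: l)]
      simp

lemma toDigits_step (m : Nat) (h : 10 ≤ m) :
    Nat.toDigits 10 m = Nat.toDigits 10 (m / 10) ++ [Nat.digitChar (m % 10)] := by
  have h0 : m / 10 ≠ 0 := by
    have := Nat.div_le_div_right (c := 10) h
    simp at this; omega
  have hlt : m / 10 < m := Nat.div_lt_self (by omega) (by norm_num)
  unfold Nat.toDigits
  conv_lhs => simp only [Nat.toDigitsCore]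
  simp only [h0, if_false]
  rw [tdc_acc m (m/10), tdc_fuel m (m/10 + 1) (m/10) [] (by omega) (by omega)]

lemma toDigits_small (m : Nat) (h : m < 10) :
    Nat.toDigits 10 m = [Nat.digitChar m] := by
  have h0 : m / 10 = 0 := Nat.div_eq_of_lt h
  unfold Nat.toDigits
  simp only [Nat.toDigitsCore, h0, if_true, Nat.mod_eq_of_lt h]

lemma ofChars_digitChar (d : Nat) (h : d < 10) :
    (PySem.Int.ofChars? [Nat.digitChar d]).getD 0 = (d : Int) := by
  interval_cases d <;> decide

-- A's per-index value (digit times place), with an extra scale factor p for the induction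
def pvVal (cs : List Char) (p : Int) (i : Nat) : Int :=
  (PySem.Int.ofChars? [cs.getD i ' ']).getD 0 * 10 ^ (cs.length - 1 - i) * p

def pvF (cs : List Char) (p : Int) : List String :=
  ((List.range cs.length).filter (fun i => pvVal cs p i ≠ 0)).map (fun i => PySem.Int.toStr (pvVal cs p i))

lemma pvVal_snoc_lt (cs : List Char) (c : Char) (p : Int) (i : Nat) (h : i < cs.length) :
    pvVal (cs ++ [c]) p i = pvVal cs (10 * p) i := by
  unfold pvVal
  rw [List.getD_append _ _ _ _ h]
  have he : (cs ++ [c]).length - 1 - i = (cs.length - 1 - i) + 1 := by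
    simp [List.length_append]; omega
  rw [he, pow_succ]; ring

lemma pvVal_snoc_last (cs : List Char) (c : Char) (p : Int) :
    pvVal (cs ++ [c]) p cs.length = (PySem.Int.ofChars? [c]).getD 0 * p := by
  unfold pvVal
  simp [List.length_append]

lemma pvF_eq_pvG (k : Nat) : ∀ (m : Nat), m = k → 0 < m → ∀ (p : Int),
    pvF (Nat.toDigits 10 m) p = pvG m p := by
  induction k using Nat.strong_induction_on with
  | _ k ih =>
    intro m hk hm p
    rw [pvG]
    by_cases h10 : m < 10
    · rw [if_pos h10]
      unfold pvF
      rw [toDigits_small m h10]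
      simp only [List.length_singleton, List.range_one]
      have hv : pvVal [Nat.digitChar m] p 0 = (m : Int) * p := by
        unfold pvVal
        simp [ofChars_digitChar m h10]
      simp only [List.filter, hv]
      split_ifs <;> simp_all
    · rw [if_neg h10]
      have hdiv : 0 < m / 10 := Nat.div_pos (by omega) (by norm_num)
      have hstep := toDigits_step m (by omega)
      set cs := Nat.toDigits 10 (m / 10) with hcs
      unfold pvF
      rw [hstep]
      have hlen : (cs ++ [Nat.digitChar (m % 10)]).length = cs.length + 1 := by simp
      rw [hlen, List.range_succ, List.filter_append, List.map_append]
      have hfix : ∀ i ∈ List.range cs.length,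
          pvVal (cs ++ [Nat.digitChar (m % 10)]) p i = pvVal cs (10 * p) i := by
        intro i hi
        exact pvVal_snoc_lt cs _ p i (List.mem_range.mp hi)
      have hfilter : (List.range cs.length).filter (fun i => pvVal (cs ++ [Nat.digitChar (m % 10)]) p i ≠ 0)
          = (List.range cs.length).filter (fun i => pvVal cs (10 * p) i ≠ 0) := by
        apply List.filter_congr
        intro i hi; simp [hfix i hi]
      have hmap : ((List.range cs.length).filter (fun i => pvVal cs (10 * p) i ≠ 0)).map
              (fun i => PySem.Int.toStr (pvVal (cs ++ [Nat.digitChar (m % 10)]) p i))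
          = ((List.range cs.length).filter (fun i => pvVal cs (10 * p) i ≠ 0)).map
              (fun i => PySem.Int.toStr (pvVal cs (10 * p) i)) := by
        apply List.map_congr_left
        intro i hi
        have := List.mem_range.mp (List.mem_of_mem_filter hi)
        rw [pvVal_snoc_lt cs _ p i this]
      rw [hfilter, hmap]
      have hrec : ((List.range cs.length).filter (fun i => pvVal cs (10 * p) i ≠ 0)).map
              (fun i => PySem.Int.toStr (pvVal cs (10 * p) i)) = pvG (m / 10) (p * 10) := by
        have := ih (m/10) (by omega) (m/10) rfl hdiv (10 * p)
        unfold pvF at this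
        rw [← hcs] at this
        rw [this, show (10 : Int) * p = p * 10 by ring]
      rw [hrec]
      have hlast : pvVal (cs ++ [Nat.digitChar (m % 10)]) p cs.length
          = ((m % 10 : Nat) : Int) * p := by
        rw [pvVal_snoc_last, ofChars_digitChar (m % 10) (Nat.mod_lt m (by norm_num))]
      congr 1
      simp only [List.filter, hlast]
      split_ifs <;> simp_all

-- ---- assembly ----
lemma parts_eq (m : Nat) (hm : 0 < m) :
    (PySem.List.pyRange 0 (PySem.List.len (Nat.toDigits 10 m)) 1).foldl (fun acc i =>
        let digit := (PySem.Int.ofChars? [PySem.List.pyGetD (Nat.toDigits 10 m) i ' ']).getD 0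
        let positionalValue := digit * 10 ^ ((PySem.List.len (Nat.toDigits 10 m)) - i - 1).toNat
        if positionalValue ≠ 0 then acc ++ [PySem.Int.toStr positionalValue] else acc) []
      = pvG m 1 := by
  set cs := Nat.toDigits 10 m with hcs
  rw [PySem.List.len_eq, PySem.List.pyRange_zero_natCast, List.foldl_map]
  refine Eq.trans (PySem.List.foldl_congr_mem _ _
      (fun acc i => if (fun j => decide (pvVal cs 1 j ≠ 0)) i = true
        then acc ++ [(fun j => PySem.Int.toStr (pvVal cs 1 j)) i] else acc) [] ?_) ?_
  · intro acc i hi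
    have hi' : i < cs.length := List.mem_range.mp hi
    have hexp : (((cs.length : Nat) : Int) - (i : Int) - 1).toNat = cs.length - 1 - i := by omega
    simp only [PySem.List.pyGetD_natCast, hexp, decide_eq_true_eq]
    unfold pvVal
    simp [mul_one, List.getD]
  · rw [PySem.List.foldl_append_if]
    have := pvF_eq_pvG m m rfl hm 1
    unfold pvF at this
    rw [← hcs] at this
    simpa using this

-- ===== VERDICT (by name: the statement is the Claim_ definition above) =====
theorem expand_number_spec : Claim_equal_expand_number := by
  unfold Claim_equal_expand_number
  intro num _
  unfold Spec_expand_number expand_number expand_number_alt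
  by_cases h : num ≤ 0
  · simp [h]
  · simp only [h, if_false]
    have hm : 0 < num.toNat := by omega
    have hnum : num = ((num.toNat : Nat) : Int) := by omega
    have hchars : PySem.Int.toChars num = Nat.toDigits 10 num.toNat := by
      unfold PySem.Int.toChars
      rw [if_neg (by omega)]
    congr 1
    have hB := expandLoop_eq_pvG num.toNat num.toNat rfl hm 1
    rw [← hnum] at hB
    rw [hchars, parts_eq num.toNat hm, hB]
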